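-- pv_equiv track=rewrite | github.com/young31/Algorithm | programmers/level5/1.문자열아름다움.py | find
-- ===== SOURCE A (Python) =====
-- def find(s):
--     n = len(s)
--     arr = [0]*n
--     for i in range(n):
--         for j in range(i+1, n):
--             if s[i] == s[j]:
--                 arr[j] = max(arr[j-1], arr[j])
--             else:
--                 arr[j] = max(arr[j], j-i)
--     return arr
-- ===== SOURCE B (Python) =====
-- def find(s):
--     # Single O(n) pass: the answer at j is max(j - firstDiff(j), prev answer if s[j] was seen),
--     # where firstDiff(j) is the first index whose char differs from s[j]: it is 0 when
--     # s[j] != s[0], and otherwise p, the first index whose char differs from s[0].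
--     n = len(s)
--     p = None
--     for i in range(1, n):
--         if s[i] != s[0]:
--             p = i
--             break
--     arr = []
--     seen = set()
--     for j in range(n):
--         if j > 0 and s[0] != s[j]:
--             c1 = j
--         elif p is not None and p < j:
--             c1 = j - p
--         else:
--             c1 = 0
--         c2 = arr[-1] if j > 0 and s[j] in seen else 0
--         arr.append(max(c1, c2))
--         seen.add(s[j])
--     return arr
-- ===== Notes on version B (the rewrite author's own statement) =====
-- stated objective: faster
-- what changed: Replaced A's O(n^2) double loop over all index pairs by a single left-to-right pass that computes each entry as max(j - firstDiff(j), previous entry if s[j] was seen before), using a seen-set and one precomputed first-differing index.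
import Mathlib
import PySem

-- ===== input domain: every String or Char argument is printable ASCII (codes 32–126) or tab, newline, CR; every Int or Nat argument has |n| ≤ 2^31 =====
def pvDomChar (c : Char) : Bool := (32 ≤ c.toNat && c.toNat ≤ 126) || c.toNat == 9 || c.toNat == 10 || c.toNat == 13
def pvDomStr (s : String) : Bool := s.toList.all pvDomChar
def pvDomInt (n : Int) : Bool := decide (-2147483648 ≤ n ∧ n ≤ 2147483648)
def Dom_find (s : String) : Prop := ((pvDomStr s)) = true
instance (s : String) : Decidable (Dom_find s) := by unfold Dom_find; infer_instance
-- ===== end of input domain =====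

-- B replaces A's O(n^2) pairwise double loop by a single pass using a seen-set and a
-- precomputed first-differing index (measurably faster, asymptotic change).

-- ===== PORT A =====
-- indices used by the Python are always in range, so pyGetD/pySetD are exact here
def bodyA (cs : List Char) (i : Int) (arr : List Int) (j : Int) : List Int :=
  if PySem.List.pyGetD cs i ' ' == PySem.List.pyGetD cs j ' ' then
    PySem.List.pySetD arr j (max (PySem.List.pyGetD arr (j - 1) 0) (PySem.List.pyGetD arr j 0))
  else
    PySem.List.pySetD arr j (max (PySem.List.pyGetD arr j 0) (j - i))

def find (s : String) : List Int :=
  let cs := s.toList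
  let n : Int := PySem.List.len cs            -- n = len(s)
  let arr : List Int := List.replicate n.toNat 0   -- arr = [0]*n
  (PySem.List.pyRange 0 n 1).foldl (fun arr i =>
    (PySem.List.pyRange (i + 1) n 1).foldl (bodyA cs i) arr) arr

-- ===== PORT B =====
-- transliteration of Source B; the break-loop computing p is the usual first-hit fold
def pStep (cs : List Char) (p : Option Int) (i : Int) : Option Int :=
  match p with
  | some _ => p
  | none => if PySem.List.pyGetD cs i ' ' != PySem.List.pyGetD cs 0 ' ' then some i else none

def bodyB (cs : List Char) (p : Option Int) (st : List Int × PySem.Set Char) (j : Int) :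
    List Int × PySem.Set Char :=
  let c1 : Int :=
    if 0 < j ∧ ¬ (PySem.List.pyGetD cs 0 ' ' == PySem.List.pyGetD cs j ' ') = true then j
    else match p with
      | some pv => if pv < j then j - pv else 0
      | none => 0
  let c2 : Int :=
    if 0 < j ∧ PySem.Set.contains st.2 (PySem.List.pyGetD cs j ' ') = true then
      PySem.List.pyGetD st.1 (-1) 0
    else 0
  (st.1 ++ [max c1 c2], PySem.Set.add st.2 (PySem.List.pyGetD cs j ' '))

def find_alt (s : String) : List Int :=
  let cs := s.toList
  let n : Int := PySem.List.len cs
  let p : Option Int := (PySem.List.pyRange 1 n 1).foldl (pStep cs) none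
  ((PySem.List.pyRange 0 n 1).foldl (bodyB cs p)
    (([] : List Int), (PySem.Set.empty : PySem.Set Char))).1

-- ===== PRECONDITION & SPEC =====
def Spec_find (s : String) (out : List Int) : Prop := out = find_alt s
instance (s : String) (out : List Int) : Decidable (Spec_find s out) := by unfold Spec_find; infer_instance

-- ===== CLAIM (what is proved, stated in full; the proofs are below) =====
def Claim_equal_find : Prop := ∀ (s : String), Dom_find s → Spec_find s (find s)

-- ===== LEMMAS AND PROOFS =====

-- character at a Nat index (all indices below are in range)
def cAt (cs : List Char) (k : ℕ) : Char := cs.getD k ' '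

-- `Wt cs i` is the content of A's array after the first `i` outer iterations,
-- viewed as a function of the position; row i+1 is computed from row i by `Wrow`.
def Wrow (cs : List Char) (i : ℕ) (prev : ℕ → Int) : ℕ → Int
  | 0 => 0
  | j + 1 =>
      if j + 1 ≤ i then prev (j + 1)
      else if cAt cs i == cAt cs (j + 1) then max (Wrow cs i prev j) (prev (j + 1))
      else max (prev (j + 1)) (((j : Int) + 1) - i)

def Wt (cs : List Char) : ℕ → ℕ → Int
  | 0 => fun _ => 0
  | i + 1 => Wrow cs i (Wt cs i)

-- B's closed form: first index whose char differs from position j's char, seen-before test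
def fdIdx (cs : List Char) (j : ℕ) : Option ℕ :=
  (List.range j).find? (fun t => !(cAt cs t == cAt cs j))

def seenB (cs : List Char) (j : ℕ) : Bool :=
  (List.range j).any (fun t => cAt cs t == cAt cs j)

def C1v (cs : List Char) (j : ℕ) : Int :=
  match fdIdx cs j with
  | some t => (j : Int) - t
  | none => 0

def Fv (cs : List Char) : ℕ → Int
  | 0 => 0
  | j + 1 => max (C1v cs (j + 1)) (if seenB cs (j + 1) then Fv cs j else 0)

theorem Wt_zero_col (cs : List Char) (i : ℕ) : Wt cs i 0 = 0 := by
  cases i <;> simp [Wt, Wrow]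

theorem Wt_frozen (cs : List Char) {i j : ℕ} (h : j ≤ i) :
    Wt cs (i + 1) j = Wt cs i j := by
  cases j with
  | zero => simp [Wt_zero_col]
  | succ j => simp [Wt, Wrow, h]

theorem Wt_step (cs : List Char) {i j : ℕ} (h : i ≤ j) :
    Wt cs (i + 1) (j + 1) =
      if cAt cs i == cAt cs (j + 1) then max (Wt cs (i + 1) j) (Wt cs i (j + 1))
      else max (Wt cs i (j + 1)) (((j : Int) + 1) - i) := by
  have h' : ¬ (j + 1 ≤ i) := by omega
  conv_lhs => rw [Wt, Wrow]
  simp [h']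
  rfl

theorem Wt_nonneg (cs : List Char) (i j : ℕ) : 0 ≤ Wt cs i j := by
  induction i generalizing j with
  | zero => simp [Wt]
  | succ i ih =>
      induction j with
      | zero => simp [Wt_zero_col]
      | succ j ihj =>
          by_cases h : j + 1 ≤ i
          · rw [Wt_frozen cs h]; exact ih _
          · rw [Wt_step cs (by omega)]
            split
            · exact le_trans (ih (j+1)) (le_max_right _ _)
            · exact le_trans (ih (j+1)) (le_max_left _ _)

theorem Wt_row_mono (cs : List Char) (i j : ℕ) : Wt cs i j ≤ Wt cs (i + 1) j := by
  cases j with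
  | zero => simp [Wt_zero_col]
  | succ j =>
      by_cases h : j + 1 ≤ i
      · rw [Wt_frozen cs h]
      · rw [Wt_step cs (by omega)]
        split
        · exact le_max_right _ _
        · exact le_max_left _ _

theorem Wt_row_mono_le (cs : List Char) {i i' : ℕ} (h : i ≤ i') (j : ℕ) :
    Wt cs i j ≤ Wt cs i' j := by
  induction i' with
  | zero =>
      have : i = 0 := by omega
      subst this; rfl
  | succ i' ih =>
      rcases Nat.lt_or_ge i (i' + 1) with hlt | hge
      · exact le_trans (ih (by omega)) (Wt_row_mono cs i' j)
      · have : i = i' + 1 := by omega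
        subst this; rfl

theorem Wt_stable (cs : List Char) {i j : ℕ} (h : j ≤ i) : Wt cs i j = Wt cs j j := by
  induction i with
  | zero =>
      have : j = 0 := by omega
      subst this
      rfl
  | succ i ih =>
      rcases Nat.lt_or_ge j (i + 1) with hlt | hge
      · rw [Wt_frozen cs (by omega)]
        exact ih (by omega)
      · have : j = i + 1 := by omega
        subst this
        rfl

theorem Wt_aux (cs : List Char) (i : ℕ)
    (hM : ∀ j : ℕ, Wt cs i j ≤ Wt cs i (j + 1)) :
    ∀ k : ℕ, Wt cs (i + 1) k ≤ max (Wt cs i k) ((k : Int) - i) := by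
  intro k
  induction k with
  | zero => simp [Wt_zero_col]
  | succ k ihk =>
      by_cases h : k + 1 ≤ i
      · rw [Wt_frozen cs h]; exact le_max_left _ _
      · rw [Wt_step cs (by omega)]
        split
        · apply max_le
          · refine le_trans ihk (max_le ?_ ?_)
            · exact le_trans (hM k) (le_max_left _ _)
            · refine le_trans ?_ (le_max_right _ _)
              omega
          · exact le_max_left _ _
        · apply max_le
          · exact le_max_left _ _
          · exact le_max_right _ _

theorem Wt_col_mono (cs : List Char) (i j : ℕ) : Wt cs i j ≤ Wt cs i (j + 1) := by
  induction i generalizing j with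
  | zero => simp [Wt]
  | succ i ih =>
      by_cases h1 : j + 1 ≤ i
      · rw [Wt_frozen cs h1, Wt_frozen cs (by omega)]; exact ih j
      · by_cases h2 : j = i
        · subst h2
          rw [Wt_frozen cs (le_refl j)]
          exact le_trans (ih j) (Wt_row_mono cs j (j + 1))
        · have hij : i ≤ j := by omega
          rw [Wt_step cs hij]
          split
          · exact le_max_left _ _
          · refine le_trans (Wt_aux cs i ih j) (max_le ?_ ?_)
            · exact le_trans (ih j) (le_max_left _ _)
            · refine le_trans ?_ (le_max_right _ _); omega

theorem Wt_desc (cs : List Char) (a : ℕ) (k : ℕ) :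
    ∀ b : ℕ, a ≤ b → Wt cs b k ≤ max (Wt cs a k) ((k : Int) - a) := by
  intro b
  induction b with
  | zero => intro h; have : a = 0 := by omega
            subst this; exact le_max_left _ _
  | succ b ih =>
      intro h
      rcases Nat.lt_or_ge a (b + 1) with hlt | hge
      · refine le_trans (Wt_aux cs b (fun j => Wt_col_mono cs b j) k) (max_le ?_ ?_)
        · exact ih (by omega)
        · refine le_trans ?_ (le_max_right _ _); omega
      · have : a = b + 1 := by omega
        subst this; exact le_max_left _ _

theorem C1v_nonneg (cs : List Char) (j : ℕ) : 0 ≤ C1v cs j := by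
  unfold C1v
  cases hfd : fdIdx cs j with
  | none => exact le_rfl
  | some t =>
      have ht : t ∈ List.range j := List.mem_of_find?_eq_some hfd
      have := List.mem_range.mp ht
      push_cast; omega

-- characterisation of find? over List.range
theorem rangeFind'_eq_some {P : ℕ → Bool} {a k t : ℕ} :
    (List.range' a k).find? P = some t ↔
      (a ≤ t ∧ t < a + k ∧ P t = true ∧ ∀ u, a ≤ u → u < t → P u = false) := by
  induction k generalizing a with
  | zero =>
      constructor
      · intro h; simp at h
      · rintro ⟨h1, h2, -, -⟩; omega
  | succ k ih =>
      rw [List.range'_succ, List.find?_cons]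
      cases hPa : P a with
      | true =>
          simp only
          constructor
          · rintro h; cases h
            exact ⟨le_rfl, by omega, hPa, fun u h1 h2 => by omega⟩
          · rintro ⟨h1, h2, h3, h4⟩
            have : t = a := by
              by_contra hne
              have := h4 a le_rfl (by omega)
              rw [hPa] at this; cases this
            rw [this]
      | false =>
          simp only
          rw [ih]
          constructor
          · rintro ⟨h1, h2, h3, h4⟩
            refine ⟨by omega, by omega, h3, fun u hu1 hu2 => ?_⟩
            rcases Nat.lt_or_ge u (a + 1) with hu | hu
            · have : u = a := by omega
              subst this; exact hPa
            · exact h4 u hu hu2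
          · rintro ⟨h1, h2, h3, h4⟩
            have hta : t ≠ a := by
              rintro rfl
              rw [h3] at hPa; cases hPa
            exact ⟨by omega, by omega, h3, fun u hu1 hu2 => h4 u (by omega) hu2⟩

theorem rangeFind_eq_some {P : ℕ → Bool} {j t : ℕ} :
    (List.range j).find? P = some t ↔
      (t < j ∧ P t = true ∧ ∀ u, u < t → P u = false) := by
  rw [List.range_eq_range', rangeFind'_eq_some]
  constructor
  · rintro ⟨_, h2, h3, h4⟩; exact ⟨by omega, h3, fun u hu => h4 u (by omega) hu⟩
  · rintro ⟨h1, h2, h3⟩; exact ⟨by omega, by omega, h2, fun u _ hu => h3 u hu⟩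

-- a first differing index exists below any differing index, and is minimal
theorem fdIdx_le {cs : List Char} {i j : ℕ} (hij : i < j)
    (hne : ¬ (cAt cs i == cAt cs j) = true) :
    ∃ t0, fdIdx cs j = some t0 ∧ t0 ≤ i ∧ t0 < j ∧ ¬ (cAt cs t0 == cAt cs j) = true := by
  cases hfd : fdIdx cs j with
  | none =>
      exfalso
      have := List.find?_eq_none.mp hfd i (List.mem_range.mpr hij)
      simp at this
      exact hne (by simp [this])
  | some t0 =>
      obtain ⟨h1, h2, h3⟩ := rangeFind_eq_some.mp hfd
      refine ⟨t0, rfl, ?_, h1, by simpa using h2⟩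
      by_contra hlt
      have := h3 i (by omega)
      simp at this
      exact hne (by simp [this])

-- upper bound: every intermediate value of A's cell j+1 is below B's closed form
theorem Wt_ub (cs : List Char) (j : ℕ)
    (ihT : Wt cs j j = Fv cs j) :
    ∀ i : ℕ, Wt cs i (j + 1) ≤
      max (C1v cs (j + 1)) (if seenB cs (j + 1) then Fv cs j else 0) := by
  intro i
  induction i with
  | zero =>
      simp only [Wt]
      exact le_trans (C1v_nonneg cs (j + 1)) (le_max_left _ _)
  | succ i ih =>
      by_cases h : j + 1 ≤ i
      · rw [Wt_frozen cs h]; exact ih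
      · have hij : i ≤ j := by omega
        rw [Wt_step cs hij]
        by_cases heq : (cAt cs i == cAt cs (j + 1)) = true
        · rw [if_pos heq]
          refine max_le ?_ ih
          have h1 : Wt cs (i + 1) j ≤ Wt cs j j := by
            rcases Nat.lt_or_ge j (i + 1) with hlt | hle
            · have hji : i = j := by omega
              rw [hji, Wt_frozen cs (le_refl j)]
            · exact Wt_row_mono_le cs hle j
          have hseen : seenB cs (j + 1) = true := by
            unfold seenB
            rw [List.any_eq_true]
            exact ⟨i, List.mem_range.mpr (by omega), heq⟩
          rw [hseen, if_pos rfl]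
          exact le_trans (ihT ▸ h1) (le_max_right _ _)
        · rw [if_neg heq]
          refine max_le ih (le_trans ?_ (le_max_left _ _))
          obtain ⟨t0, hfd, ht0i, ht0j, -⟩ := fdIdx_le (by omega : i < j + 1) heq
          unfold C1v
          rw [hfd]
          push_cast
          omega

-- lower bound 1: the final value dominates the first-diff candidate
theorem Wt_lb1 (cs : List Char) (j : ℕ) : C1v cs (j + 1) ≤ Wt cs (j + 1) (j + 1) := by
  cases hfd : fdIdx cs (j + 1) with
  | none => unfold C1v; rw [hfd]; exact Wt_nonneg cs _ _
  | some t0 =>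
      obtain ⟨h1, h2, -⟩ := rangeFind_eq_some.mp hfd
      have h2' : ¬ (cAt cs t0 == cAt cs (j + 1)) = true := by simpa using h2
      have hstep : ((j : Int) + 1) - t0 ≤ Wt cs (t0 + 1) (j + 1) := by
        rw [Wt_step cs (by omega : t0 ≤ j), if_neg h2']
        exact le_max_right _ _
      have hchain : Wt cs (t0 + 1) (j + 1) ≤ Wt cs (j + 1) (j + 1) :=
        Wt_row_mono_le cs (by omega) _
      unfold C1v
      rw [hfd]
      push_cast
      omega

-- lower bound 2: if the char was seen before, the final value dominates the previous cell
theorem Wt_lb2 (cs : List Char) (j : ℕ) (ihT : Wt cs j j = Fv cs j)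
    (hs : seenB cs (j + 1) = true) : Fv cs j ≤ Wt cs (j + 1) (j + 1) := by
  obtain ⟨t, htm, hPt⟩ := List.any_eq_true.mp hs
  have htj : t < j + 1 := List.mem_range.mp htm
  set Q : ℕ → Prop := fun u => (cAt cs u == cAt cs (j + 1)) = true with hQ
  have hQt : Q t := hPt
  have hQie : Q (Nat.findGreatest Q j) := Nat.findGreatest_spec (by omega : t ≤ j) hQt
  have hie_le : Nat.findGreatest Q j ≤ j := Nat.findGreatest_le j
  set ie := Nat.findGreatest Q j with hie
  have hmax : ∀ u, ie < u → u ≤ j → ¬ Q u := fun u h1 h2 =>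
    Nat.findGreatest_is_greatest h1 h2
  rcases Nat.eq_or_lt_of_le hie_le with hcase | hcase
  · -- last equal index is j itself
    have hQj : Q j := hcase ▸ hQie
    have : Wt cs (j + 1) j ≤ Wt cs (j + 1) (j + 1) := by
      rw [Wt_step cs (le_refl j), if_pos hQj]
      exact le_max_left _ _
    rw [Wt_frozen cs (le_refl j)] at this
    exact le_trans (le_of_eq ihT.symm) this
  · -- last equal index ie < j; rows above ie all differ from cs[j+1]
    have ha : Wt cs (ie + 1) j ≤ Wt cs (j + 1) (j + 1) := by
      have : Wt cs (ie + 1) j ≤ Wt cs (ie + 1) (j + 1) := by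
        rw [Wt_step cs (by omega : ie ≤ j), if_pos hQie]
        exact le_max_left _ _
      exact le_trans this (Wt_row_mono_le cs (by omega) _)
    have hb : (j : Int) - ie ≤ Wt cs (j + 1) (j + 1) := by
      have hne : ¬ Q (ie + 1) := hmax (ie + 1) (by omega) (by omega)
      have : ((j : Int) + 1) - (↑(ie + 1) : ℕ) ≤ Wt cs (ie + 2) (j + 1) := by
        rw [Wt_step cs (by omega : ie + 1 ≤ j), if_neg hne]
        exact le_max_right _ _
      refine le_trans ?_ (le_trans this (Wt_row_mono_le cs (by omega) _))
      push_cast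
      omega
    have hc : Wt cs j j ≤ max (Wt cs (ie + 1) j) ((j : Int) - (↑(ie + 1) : ℕ)) :=
      Wt_desc cs (ie + 1) j j (by omega)
    rw [← ihT]
    refine le_trans hc (max_le ha (le_trans ?_ hb))
    push_cast
    omega

theorem main_T (cs : List Char) : ∀ j : ℕ, Wt cs j j = Fv cs j := by
  intro j
  induction j using Nat.strong_induction_on with
  | _ j ih =>
      cases j with
      | zero => simp [Wt, Fv]
      | succ j =>
          have ihT : Wt cs j j = Fv cs j := ih j (by omega)
          apply le_antisymm
          · exact le_trans (Wt_ub cs j ihT (j + 1)) (le_of_eq (by simp [Fv]))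
          · have hFv : Fv cs (j + 1) =
                max (C1v cs (j + 1)) (if seenB cs (j + 1) then Fv cs j else 0) := by
              simp [Fv]
            rw [hFv]
            refine max_le (Wt_lb1 cs j) ?_
            by_cases hs : seenB cs (j + 1) = true
            · rw [if_pos hs]
              exact Wt_lb2 cs j ihT hs
            · rw [if_neg hs]
              exact Wt_nonneg cs _ _

-- A's port: loop bridges
theorem Wt_step' (cs : List Char) {i m : ℕ} (him : i < m) :
    Wt cs (i + 1) m =
      if cAt cs i == cAt cs m then max (Wt cs (i + 1) (m - 1)) (Wt cs i m)
      else max (Wt cs i m) ((m : Int) - i) := by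
  cases m with
  | zero => omega
  | succ j =>
      rw [Wt_step cs (by omega)]
      simp only [Nat.add_sub_cancel]
      push_cast
      rfl

theorem set_map_range {α : Type} (f : ℕ → α) {n m : ℕ} (v : α) (_hm : m < n) :
    ((List.range n).map f).set m v = (List.range n).map (fun k => if k = m then v else f k) := by
  apply List.ext_getElem (by simp)
  intro idx h1 h2
  simp only [List.getElem_set, List.getElem_map, List.getElem_range]
  by_cases h : m = idx
  · subst h; simp
  · rw [if_neg h, if_neg (fun hh => h hh.symm)]

theorem bodyA_eval (cs : List Char) {i m : ℕ} (him : i < m) (hm : m < cs.length) :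
    bodyA cs (i : Int)
        ((List.range cs.length).map (fun k => if k < m then Wt cs (i + 1) k else Wt cs i k))
        (m : Int)
      = (List.range cs.length).map (fun k => if k < m + 1 then Wt cs (i + 1) k else Wt cs i k) := by
  have hca : ∀ k : ℕ, cs.getD k ' ' = cAt cs k := fun _ => rfl
  have hm1 : (m : Int) - 1 = ((m - 1 : ℕ) : Int) := by omega
  unfold bodyA
  rw [hm1]
  simp only [PySem.List.pyGetD_natCast, PySem.List.pySetD_natCast]
  rw [PySem.List.getD_map_range _ _ _ _ hm, PySem.List.getD_map_range _ _ _ _ (by omega : m - 1 < cs.length)]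
  simp only [hca, lt_irrefl, if_false, if_pos (by omega : m - 1 < m)]
  have hwm := Wt_step' cs him
  by_cases hc : (cAt cs i == cAt cs m) = true
  · rw [if_pos hc, set_map_range _ _ hm]
    apply List.map_congr_left
    intro k hk
    by_cases hkm : k = m
    · subst hkm
      rw [if_pos rfl, if_pos (by omega), hwm, if_pos hc]
    · rw [if_neg hkm]
      by_cases hklt : k < m
      · rw [if_pos hklt, if_pos (by omega)]
      · rw [if_neg hklt, if_neg (by omega)]
  · rw [if_neg hc, set_map_range _ _ hm]
    apply List.map_congr_left
    intro k hk
    by_cases hkm : k = m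
    · subst hkm
      rw [if_pos rfl, if_pos (by omega), hwm, if_neg hc]
    · rw [if_neg hkm]
      by_cases hklt : k < m
      · rw [if_pos hklt, if_pos (by omega)]
      · rw [if_neg hklt, if_neg (by omega)]

theorem innerA (cs : List Char) (i : ℕ) :
    ∀ (d m : ℕ), i < m → m ≤ cs.length → cs.length - m = d →
    (PySem.List.pyRange (m : Int) ((cs.length : ℕ) : Int) 1).foldl (bodyA cs (i : Int))
        ((List.range cs.length).map (fun k => if k < m then Wt cs (i + 1) k else Wt cs i k))
      = (List.range cs.length).map (fun k => Wt cs (i + 1) k) := by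
  intro d
  induction d with
  | zero =>
      intro m him hm' hd
      have hm'' : m = cs.length := by omega
      subst hm''
      rw [PySem.List.pyRange_one_eq_nil (le_refl _)]
      simp only [List.foldl_nil]
      apply List.map_congr_left
      intro k hk
      rw [if_pos (List.mem_range.mp hk)]
  | succ d ihd =>
      intro m him hm hd
      have hmlt : m < cs.length := by omega
      rw [PySem.List.pyRange_one_cons (by exact_mod_cast hmlt)]
      rw [List.foldl_cons, bodyA_eval cs him hmlt]
      rw [show ((m : Int) + 1) = ((m + 1 : ℕ) : Int) by push_cast; ring]
      exact ihd (m + 1) (by omega) (by omega) (by omega)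

theorem outerA (cs : List Char) :
    ∀ (d m : ℕ), m ≤ cs.length → cs.length - m = d →
    (PySem.List.pyRange (m : Int) ((cs.length : ℕ) : Int) 1).foldl
        (fun arr i => (PySem.List.pyRange (i + 1) ((cs.length : ℕ) : Int) 1).foldl (bodyA cs i) arr)
        ((List.range cs.length).map (fun k => Wt cs m k))
      = (List.range cs.length).map (fun k => Wt cs cs.length k) := by
  intro d
  induction d with
  | zero =>
      intro m hm hd
      have hm' : m = cs.length := by omega
      subst hm'
      rw [PySem.List.pyRange_one_eq_nil (le_refl _)]
      rfl
  | succ d ihd =>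
      intro m hm hd
      have hmlt : m < cs.length := by omega
      rw [PySem.List.pyRange_one_cons (by exact_mod_cast hmlt)]
      simp only [List.foldl_cons]
      rw [show ((m : Int) + 1) = ((m + 1 : ℕ) : Int) by push_cast; ring]
      have hinit : (List.range cs.length).map (fun k => Wt cs m k)
          = (List.range cs.length).map (fun k => if k < m + 1 then Wt cs (m + 1) k else Wt cs m k) := by
        apply List.map_congr_left
        intro k hk
        by_cases hkm : k < m + 1
        · rw [if_pos hkm, Wt_frozen cs (by omega)]
        · rw [if_neg hkm]
      rw [hinit, innerA cs m (cs.length - (m + 1)) (m + 1) (by omega) (by omega) (by omega)]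
      exact ihd (m + 1) (by omega) (by omega)

theorem portA_eq_map (s : String) :
    find s = (List.range s.toList.length).map (fun k => Wt s.toList s.toList.length k) := by
  unfold find
  simp only [PySem.List.len_eq, Int.toNat_natCast]
  have hrep : List.replicate s.toList.length (0 : Int)
      = (List.range s.toList.length).map (fun k => Wt s.toList 0 k) := by
    rw [show (fun k => Wt s.toList 0 k) = (fun _ : ℕ => (0 : Int)) from rfl,
        List.map_const', List.length_range]
  rw [hrep, show (0 : Int) = ((0 : ℕ) : Int) by norm_num]
  exact outerA s.toList s.toList.length 0 (by omega) rfl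

-- B's port: loop bridges
def pN (cs : List Char) : Option ℕ :=
  (List.range' 1 (cs.length - 1)).find? (fun t => !(cAt cs t == cAt cs 0))

theorem pStep_some (cs : List Char) (x : Int) :
    ∀ l : List Int, l.foldl (pStep cs) (some x) = some x := by
  intro l
  induction l with
  | nil => rfl
  | cons y l ih => rw [List.foldl_cons]; exact ih

theorem pfold (cs : List Char) :
    ∀ (d m : ℕ), 1 ≤ m → m ≤ cs.length → cs.length - m = d →
    (PySem.List.pyRange (m : Int) ((cs.length : ℕ) : Int) 1).foldl (pStep cs) none
      = ((List.range' m (cs.length - m)).find? (fun t => !(cAt cs t == cAt cs 0))).map (Nat.cast : ℕ → ℤ) := by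
  intro d
  induction d with
  | zero =>
      intro m h1 hm hd
      have hm' : m = cs.length := by omega
      subst hm'
      rw [PySem.List.pyRange_one_eq_nil (le_refl _)]
      simp
  | succ d ihd =>
      intro m h1 hm hd
      have hmlt : m < cs.length := by omega
      rw [PySem.List.pyRange_one_cons (by exact_mod_cast hmlt)]
      rw [List.foldl_cons]
      have hstep : pStep cs none (m : Int)
          = if !(cAt cs m == cAt cs 0) then some (m : Int) else none := by
        unfold pStep
        simp only [PySem.List.pyGetD_natCast, PySem.List.pyGetD_zero]
        rfl
      rw [show cs.length - m = (cs.length - m - 1) + 1 by omega, List.range'_succ]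
      by_cases hx : (!(cAt cs m == cAt cs 0)) = true
      · rw [hstep, if_pos hx, pStep_some,
            List.find?_cons_of_pos (p := fun t => !(cAt cs t == cAt cs 0)) hx]
        simp
      · rw [hstep, if_neg hx,
            List.find?_cons_of_neg (p := fun t => !(cAt cs t == cAt cs 0)) (by simpa using hx)]
        rw [show ((m : Int) + 1) = ((m + 1 : ℕ) : Int) by push_cast; ring]
        rw [ihd (m + 1) (by omega) (by omega) (by omega)]
        rw [show cs.length - (m + 1) = cs.length - m - 1 by omega]

theorem p_eq (cs : List Char) :
    (PySem.List.pyRange 1 ((cs.length : ℕ) : Int) 1).foldl (pStep cs) none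
      = (pN cs).map (Nat.cast : ℕ → ℤ) := by
  rcases Nat.eq_zero_or_pos cs.length with h0 | hpos
  · rw [PySem.List.pyRange_one_eq_nil (by omega : ((cs.length : ℕ) : Int) ≤ 1)]
    unfold pN
    rw [h0]
    rfl
  · have := pfold cs (cs.length - 1) 1 (le_refl 1) (by omega) (by omega)
    rw [show ((1 : ℕ) : Int) = (1 : Int) by norm_num] at this
    rw [this]
    rfl

-- characterisation of pN
theorem pN_some {cs : List Char} {t : ℕ} (h : pN cs = some t) :
    1 ≤ t ∧ t < cs.length ∧ ¬ (cAt cs t == cAt cs 0) = true ∧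
      ∀ u, 1 ≤ u → u < t → (cAt cs u == cAt cs 0) = true := by
  obtain ⟨h1, h2, h3, h4⟩ := rangeFind'_eq_some.mp h
  refine ⟨h1, by omega, by simpa using h3, fun u hu1 hu2 => ?_⟩
  have := h4 u hu1 hu2
  simpa using this

theorem pN_none {cs : List Char} (h : pN cs = none) :
    ∀ u, 1 ≤ u → u < cs.length → (cAt cs u == cAt cs 0) = true := by
  intro u hu1 hu2
  have := List.find?_eq_none.mp h u (by
    rw [List.mem_range']
    exact ⟨u - 1, by omega, by omega⟩)
  simpa using this

theorem c1_eq (cs : List Char) (m : ℕ) (hm : m < cs.length) :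
    (if 0 < (m : Int) ∧ ¬ (cAt cs 0 == cAt cs m) = true then (m : Int)
     else match (pN cs).map (Nat.cast : ℕ → ℤ) with
       | some pv => if pv < (m : Int) then (m : Int) - pv else 0
       | none => 0) = C1v cs m := by
  rcases Nat.eq_zero_or_pos m with hm0 | hmpos
  · subst hm0
    rw [if_neg (by simp)]
    unfold C1v fdIdx
    cases hp : pN cs with
    | none => simp
    | some t =>
        have ht := (pN_some hp).1
        simp only [Option.map_some]
        rw [if_neg (by omega)]
        rfl
  · by_cases hc0 : (cAt cs 0 == cAt cs m) = true
    · -- s[0] == s[m]: the first differing index below m is pN when pN < m, else none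
      rw [if_neg (by simp [hc0])]
      have hc0' : cAt cs 0 = cAt cs m := by simpa using hc0
      cases hp : pN cs with
      | none =>
          have hnone : fdIdx cs m = none := by
            apply List.find?_eq_none.mpr
            intro u hu
            have hum : u < m := List.mem_range.mp hu
            rcases Nat.eq_zero_or_pos u with h | h
            · subst h; simp [hc0']
            · have := pN_none hp u h (by omega)
              have : cAt cs u = cAt cs 0 := by simpa using this
              simp [this, hc0']
          unfold C1v
          rw [hnone]
          rfl
      | some t =>
          simp only [Option.map_some]
          by_cases htm : t < m
          · rw [if_pos (by exact_mod_cast htm)]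
            obtain ⟨ht1, ht2, ht3, ht4⟩ := pN_some hp
            have hsome : fdIdx cs m = some t := by
              apply rangeFind_eq_some.mpr
              refine ⟨htm, ?_, fun u hu => ?_⟩
              · have : cAt cs t ≠ cAt cs 0 := by simpa using ht3
                simp [hc0' ▸ this]
              · rcases Nat.eq_zero_or_pos u with h | h
                · subst h; simp [hc0']
                · have := ht4 u h hu
                  have : cAt cs u = cAt cs 0 := by simpa using this
                  simp [this, hc0']
            unfold C1v
            rw [hsome]
          · rw [if_neg (by exact_mod_cast htm)]
            obtain ⟨ht1, ht2, ht3, ht4⟩ := pN_some hp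
            have hnone : fdIdx cs m = none := by
              apply List.find?_eq_none.mpr
              intro u hu
              have hum : u < m := List.mem_range.mp hu
              rcases Nat.eq_zero_or_pos u with h | h
              · subst h; simp [hc0']
              · have := ht4 u h (by omega)
                have : cAt cs u = cAt cs 0 := by simpa using this
                simp [this, hc0']
            unfold C1v
            rw [hnone]
    · -- s[0] != s[m]: first differing index is 0
      rw [if_pos ⟨by exact_mod_cast hmpos, hc0⟩]
      have hsome : fdIdx cs m = some 0 := by
        apply rangeFind_eq_some.mpr
        exact ⟨hmpos, by simp [hc0], fun u hu => by omega⟩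
      unfold C1v
      rw [hsome]
      simp

theorem seen_eq (cs : List Char) (m : ℕ) (hm : m < cs.length) :
    PySem.Set.contains (PySem.Set.ofList (cs.take m)) (cAt cs m) = seenB cs m := by
  rw [Bool.eq_iff_iff]
  constructor
  · intro h
    have hmem : cAt cs m ∈ cs.take m := by
      rw [← PySem.Set.mem_ofList]
      exact List.contains_iff_mem.mp h
    obtain ⟨t, ht, hEq⟩ := List.mem_take_iff_getElem.mp hmem
    unfold seenB
    rw [List.any_eq_true]
    refine ⟨t, List.mem_range.mpr (by omega), ?_⟩
    have : cAt cs t = cAt cs m :=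
      (List.getD_eq_getElem cs ' ' (by omega)).trans hEq
    simp [this]
  · intro h
    obtain ⟨t, htm, hEq⟩ := List.any_eq_true.mp h
    have htm' : t < m := List.mem_range.mp htm
    apply List.contains_iff_mem.mpr
    rw [PySem.Set.mem_ofList]
    rw [List.mem_take_iff_getElem]
    refine ⟨t, by omega, ?_⟩
    have h1 : cAt cs t = cAt cs m := by simpa using hEq
    exact (List.getD_eq_getElem cs ' ' (by omega)).symm.trans h1

theorem ofList_append_singleton {α : Type} [BEq α] (xs : List α) (x : α) :
    PySem.Set.ofList (xs ++ [x]) = PySem.Set.add (PySem.Set.ofList xs) x := by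
  rw [PySem.Set.ofList_eq_foldl, List.foldl_append, ← PySem.Set.ofList_eq_foldl]
  rfl

theorem bodyB_eval (cs : List Char) (m : ℕ) (hm : m < cs.length) :
    bodyB cs ((pN cs).map (Nat.cast : ℕ → ℤ))
        ((List.range m).map (Fv cs), PySem.Set.ofList (cs.take m)) (m : Int)
      = ((List.range (m + 1)).map (Fv cs), PySem.Set.ofList (cs.take (m + 1))) := by
  have hca : ∀ k : ℕ, cs.getD k ' ' = cAt cs k := fun _ => rfl
  unfold bodyB
  simp only [PySem.List.pyGetD_natCast, PySem.List.pyGetD_zero, hca]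
  rw [c1_eq cs m hm, seen_eq cs m hm]
  have harr : (List.range m).map (Fv cs) ++ [Fv cs m] = (List.range (m + 1)).map (Fv cs) := by
    rw [List.range_succ, List.map_append]
    rfl
  have hset : PySem.Set.add (PySem.Set.ofList (cs.take m)) (cAt cs m)
      = PySem.Set.ofList (cs.take (m + 1)) := by
    rw [List.take_add_one, List.getElem?_eq_getElem hm]
    simp only [Option.toList_some]
    rw [ofList_append_singleton]
    congr 1
    exact List.getD_eq_getElem cs ' ' hm
  rcases Nat.eq_zero_or_pos m with hm0 | hmpos
  · subst hm0
    rw [if_neg (by simp)]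
    rw [← harr, ← hset]
    have : max (C1v cs 0) 0 = Fv cs 0 := by
      unfold C1v fdIdx
      simp [Fv]
    rw [this]
  · have hm1 : m - 1 + 1 = m := by omega
    by_cases hs : seenB cs m = true
    · rw [if_pos ⟨by exact_mod_cast hmpos, hs⟩]
      have hneg : PySem.List.pyGetD ((List.range m).map (Fv cs)) (-1) 0 = Fv cs (m - 1) := by
        rw [show m = (m - 1) + 1 by omega, List.range_succ, List.map_append]
        exact PySem.List.pyGetD_neg_one_append_singleton _ _ _
      rw [hneg, ← harr, ← hset]
      have : max (C1v cs m) (Fv cs (m - 1)) = Fv cs m := by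
        conv_rhs => rw [show m = (m - 1) + 1 by omega]
        rw [show Fv cs (m - 1 + 1) = max (C1v cs (m - 1 + 1)) (if seenB cs (m - 1 + 1) then Fv cs (m - 1) else 0) from rfl]
        rw [hm1, if_pos hs]
      rw [this]
    · rw [if_neg (by rintro ⟨-, hss⟩; exact hs hss)]
      rw [← harr, ← hset]
      have : max (C1v cs m) 0 = Fv cs m := by
        conv_rhs => rw [show m = (m - 1) + 1 by omega]
        rw [show Fv cs (m - 1 + 1) = max (C1v cs (m - 1 + 1)) (if seenB cs (m - 1 + 1) then Fv cs (m - 1) else 0) from rfl]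
        rw [hm1, if_neg hs]
      rw [this]

theorem innerB (cs : List Char) :
    ∀ (d m : ℕ), m ≤ cs.length → cs.length - m = d →
    (PySem.List.pyRange (m : Int) ((cs.length : ℕ) : Int) 1).foldl
        (bodyB cs ((pN cs).map (Nat.cast : ℕ → ℤ)))
        ((List.range m).map (Fv cs), PySem.Set.ofList (cs.take m))
      = ((List.range cs.length).map (Fv cs), PySem.Set.ofList cs) := by
  intro d
  induction d with
  | zero =>
      intro m hm hd
      have hm' : m = cs.length := by omega
      subst hm'
      rw [PySem.List.pyRange_one_eq_nil (le_refl _)]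
      rw [List.foldl_nil, List.take_length]
  | succ d ihd =>
      intro m hm hd
      have hmlt : m < cs.length := by omega
      rw [PySem.List.pyRange_one_cons (by exact_mod_cast hmlt)]
      rw [List.foldl_cons, bodyB_eval cs m hmlt]
      rw [show ((m : Int) + 1) = ((m + 1 : ℕ) : Int) by push_cast; ring]
      exact ihd (m + 1) (by omega) (by omega)

-- B's port returns the closed form
theorem portB_eq_map (s : String) :
    find_alt s = (List.range s.toList.length).map (fun k => Fv s.toList k) := by
  unfold find_alt
  simp only [PySem.List.len_eq]
  rw [p_eq s.toList]
  have h0 : (([] : List Int), (PySem.Set.empty : PySem.Set Char))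
      = ((List.range 0).map (Fv s.toList), PySem.Set.ofList (s.toList.take 0)) := rfl
  rw [h0, show (0 : Int) = ((0 : ℕ) : Int) by norm_num,
      innerB s.toList s.toList.length 0 (by omega) rfl]

-- ===== VERDICT (by name: the statement is the Claim_ definition above) =====
theorem find_spec : Claim_equal_find := by
  intro s _
  unfold Spec_find
  rw [portA_eq_map, portB_eq_map]
  apply List.map_congr_left
  intro k hk
  have hk' : k ≤ s.toList.length := le_of_lt (List.mem_range.mp hk)
  rw [Wt_stable s.toList hk', main_T]
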